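-- pv_equiv track=rewrite | github.com/PasiKoodaa/ACE-Step-1.5-RADIO | acestep/gradio_ui/api_routes.py | _cleanup_lyrics_text
-- ===== SOURCE A (Python) =====
-- from typing import Any, Dict, List, Optional
--
-- def _cleanup_lyrics_text(text: Optional[str]) -> Optional[str]:
--     """Normalize lyrics text and strip common LRC timestamps."""
--     if not text:
--         return None
--     cleaned_lines: List[str] = []
--     for raw in str(text).splitlines():
--         line = raw.strip()
--         while line.startswith("[") and "]" in line:
--             head = line[1:line.index("]")]
--             if ":" not in head:
--                 break
--             line = line[line.index("]") + 1:].lstrip()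
--         if line:
--             cleaned_lines.append(line)
--     cleaned = "\n".join(cleaned_lines).strip()
--     return cleaned or None
-- ===== SOURCE B (Python) =====
-- import re
-- from typing import Optional
--
-- # One regex, compiled once: strips a leading run of [..:..] timestamp groups
-- # (content bounded at the first ']', must contain ':') plus following whitespace.
-- _TS = re.compile(r'^(?:\[[^\]]*:[^\]]*\]\s*)+')
--
-- def _cleanup_lyrics_text(text: Optional[str]) -> Optional[str]:
--     """Normalize lyrics text and strip common LRC timestamps."""
--     if not text:
--         return None
--     lines = [ln for raw in str(text).splitlines() if (ln := _TS.sub('', raw.strip()))]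
--     return "\n".join(lines).strip() or None
-- ===== Notes on version B (the rewrite author's own statement) =====
-- stated objective: idiomatic
-- what changed: The hand-written while loop with startswith/index/slicing that strips leading LRC timestamp brackets per line is replaced by a single precompiled regex substitution, and the explicit accumulator loop over lines by a filtering comprehension.
import Mathlib
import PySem

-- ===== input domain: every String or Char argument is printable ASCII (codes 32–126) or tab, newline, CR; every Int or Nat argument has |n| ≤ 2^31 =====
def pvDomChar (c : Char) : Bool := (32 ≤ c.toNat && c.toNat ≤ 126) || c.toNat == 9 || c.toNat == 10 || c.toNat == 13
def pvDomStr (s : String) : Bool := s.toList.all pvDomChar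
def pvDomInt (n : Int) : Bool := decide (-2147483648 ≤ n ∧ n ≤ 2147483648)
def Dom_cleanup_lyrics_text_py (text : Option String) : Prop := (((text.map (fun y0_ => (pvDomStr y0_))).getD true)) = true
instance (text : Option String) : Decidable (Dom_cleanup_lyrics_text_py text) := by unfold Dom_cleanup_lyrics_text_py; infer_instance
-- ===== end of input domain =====

-- B replaces A's inner while/index/slice bracket-stripping loop by a single precompiled
-- regex substitution per line and a filtering comprehension (objective: idiomatic).

-- ===== PORT A =====
-- the inner 'while line.startswith("[") and "]" in line: …' loop of A

def pvStripA (line : List Char) : List Char :=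
  if h : PySem.Chars.startswith line ['['] = true ∧ PySem.Chars.isIn [']'] line = true then
    let idx : Int := PySem.Chars.find line [']']
    let head := PySem.List.slice line (some 1) (some idx)
    if PySem.Chars.isIn [':'] head = true then
      pvStripA (PySem.Chars.lstrip (PySem.List.slice line (some (idx + 1)) none))
    else line
  else line
termination_by line.length
decreasing_by
  have hnn : 0 ≤ PySem.Chars.find line [']'] := by
    rw [PySem.Chars.find_nonneg_iff]; exact (PySem.Chars.isIn_iff_infix _ _).mp h.2
  have hne : line ≠ [] := by
    intro hl; rw [hl] at h
    exact absurd ((PySem.Chars.startswith_iff _ _).mp h.1) (by simp)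
  rw [PySem.List.slice_from line (by omega)]
  calc (PySem.Chars.lstrip (List.drop (PySem.Chars.find line [']'] + 1).toNat line)).length
      ≤ (List.drop (PySem.Chars.find line [']'] + 1).toNat line).length :=
        List.length_dropWhile_le _ _
    _ < line.length := by
        have h1 : 1 ≤ (PySem.Chars.find line [']'] + 1).toNat := by omega
        have hpos : 0 < line.length := List.length_pos_of_ne_nil hne
        simp only [List.length_drop]; omega


def cleanup_lyrics_text_py (text : Option String) : Option String :=
  match text with
  | none => none  -- 'if not text: return None'
  | some s =>
    if s.toList = [] then none  -- '' is falsy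
    else
      let cleaned_lines :=
        (PySem.Chars.splitlines s.toList).foldl
          (fun acc raw =>
            let line := pvStripA (PySem.Chars.strip raw)
            if line ≠ [] then acc ++ [line] else acc) []
      let cleaned := PySem.Chars.strip (PySem.Chars.join ['\n'] cleaned_lines)
      if cleaned = [] then none else some (String.ofList cleaned)

-- ===== PORT B =====
-- hand port of matching one group of the regex '\[[^\]]*:[^\]]*\]\s*' at the start of cs;
-- exact for this pattern: '[', then the ']'-free content (bounded at the FIRST ']') which
-- must contain ':', that ']', then maximal whitespace ('\s*' = dropWhile isspace here)
def pvMatchTS (cs : List Char) : Option (List Char) :=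
  if cs.head? = some '[' then
    let rest := cs.tail
    let content := rest.takeWhile (· ≠ ']')
    let after := rest.drop content.length
    if after.head? = some ']' then
      if ':' ∈ content then some (after.tail.dropWhile PySem.Chars.isspace) else none
    else none
  else none

theorem pvMatchTS_length_lt (cs rest : List Char) (h : pvMatchTS cs = some rest) :
    rest.length < cs.length := by
  simp only [pvMatchTS] at h
  split_ifs at h with h1 h2 h3
  · injection h with h
    subst h
    have hcs : cs ≠ [] := by intro hc; rw [hc] at h1; simp at h1
    have hafter : (cs.tail.drop (cs.tail.takeWhile (· ≠ ']')).length) ≠ [] := by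
      intro hc; rw [hc] at h2; simp at h2
    have l1 := List.length_dropWhile_le PySem.Chars.isspace
      ((cs.tail.drop (cs.tail.takeWhile (· ≠ ']')).length).tail)
    have l2 : ((cs.tail.drop (cs.tail.takeWhile (· ≠ ']')).length).tail).length
        = (cs.tail.drop (cs.tail.takeWhile (· ≠ ']')).length).length - 1 := List.length_tail
    have l3 : 0 < (cs.tail.drop (cs.tail.takeWhile (· ≠ ']')).length).length :=
      List.length_pos_of_ne_nil hafter
    have l4 : (cs.tail.drop (cs.tail.takeWhile (· ≠ ']')).length).length ≤ cs.tail.length := by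
      rw [List.length_drop]; omega
    have l5 : cs.tail.length = cs.length - 1 := List.length_tail
    have l6 : 0 < cs.length := List.length_pos_of_ne_nil hcs
    omega

def pvSubTS (cs : List Char) : List Char :=
  match hm : pvMatchTS cs with
  | some rest => pvSubTS rest
  | none => cs
termination_by cs.length
decreasing_by exact pvMatchTS_length_lt cs rest hm


def cleanup_lyrics_text_py_alt (text : Option String) : Option String :=
  match text with
  | none => none
  | some s =>
    if s.toList = [] then none
    else
      let lines := (PySem.Chars.splitlines s.toList).filterMap
        (fun raw =>
          let ln := pvSubTS (PySem.Chars.strip raw)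
          if ln = [] then none else some ln)
      let cleaned := PySem.Chars.strip (PySem.Chars.join ['\n'] lines)
      if cleaned = [] then none else some (String.ofList cleaned)

-- ===== PRECONDITION & SPEC =====
def Spec_cleanup_lyrics_text_py (text : Option String) (out : Option String) : Prop := out = cleanup_lyrics_text_py_alt text
instance (text : Option String) (out : Option String) : Decidable (Spec_cleanup_lyrics_text_py text out) := by unfold Spec_cleanup_lyrics_text_py; infer_instance

-- ===== CLAIM (what is proved, stated in full; the proofs are below) =====
def Claim_equal_cleanup_lyrics_text_py : Prop := ∀ (text : Option String), Dom_cleanup_lyrics_text_py text → Spec_cleanup_lyrics_text_py text (cleanup_lyrics_text_py text)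

-- ===== LEMMAS AND PROOFS =====

theorem pvDropLenTakeWhile {α : Type} (p : α → Bool) (l : List α) :
    l.drop (l.takeWhile p).length = l.dropWhile p := by
  have h := List.takeWhile_append_dropWhile (p := p) (l := l)
  calc l.drop (l.takeWhile p).length
      = (l.takeWhile p ++ l.dropWhile p).drop (l.takeWhile p).length := by rw [h]
    _ = l.dropWhile p := List.drop_left

theorem pvDropWhileNe_ne_nil {α : Type} [DecidableEq α] (l : List α) (c : α) (hc : c ∈ l) :
    l.dropWhile (· ≠ c) ≠ [] := by
  rw [Ne, List.dropWhile_eq_nil_iff]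
  intro hall
  have := hall c hc
  simp at this

theorem pvHead_dropWhileNe {α : Type} [DecidableEq α] (l : List α) (c : α) (hc : c ∈ l) :
    (l.dropWhile (· ≠ c)).head (pvDropWhileNe_ne_nil l c hc) = c := by
  have := List.head_dropWhile_not (fun x => decide (x ≠ c)) (pvDropWhileNe_ne_nil l c hc)
  simpa using this

theorem pvFindSingleton (s : List Char) (c : Char) (hc : c ∈ s) :
    PySem.Chars.find s [c] = ((s.takeWhile (· ≠ c)).length : Int) := by
  have h0 : 0 ≤ PySem.Chars.find s [c] := by
    rw [PySem.Chars.find_nonneg_iff]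
    exact (List.singleton_infix_iff c s).mpr hc
  obtain ⟨hpre, hmin⟩ := PySem.Chars.find_spec h0
  set k := (PySem.Chars.find s [c]).toNat with hkdef
  set t := s.takeWhile (· ≠ c) with htdef
  have hd : s.drop t.length = s.dropWhile (· ≠ c) := pvDropLenTakeWhile _ s
  have hdn : s.dropWhile (· ≠ c) ≠ [] := pvDropWhileNe_ne_nil s c hc
  have hhead : (s.dropWhile (· ≠ c)).head hdn = c := pvHead_dropWhileNe s c hc
  have hkt : k = t.length := by
    rcases Nat.lt_trichotomy k t.length with hlt | heq | hgt
    · exfalso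
      obtain ⟨u, hu⟩ := hpre
      have hsk : s.drop k = c :: u := by simpa using hu.symm
      have hsplit := List.takeWhile_append_dropWhile (p := fun x => decide (x ≠ c)) (l := s)
      have hdk : s.drop k = t.drop k ++ s.dropWhile (· ≠ c) := by
        conv_lhs => rw [← hsplit]
        rw [List.drop_append_of_le_length (le_of_lt hlt)]
      have htk : t.drop k = t[k] :: t.drop (k + 1) := List.drop_eq_getElem_cons hlt
      have heq2 : c :: u = t[k] :: (t.drop (k + 1) ++ s.dropWhile (· ≠ c)) := by
        rw [← hsk, hdk, htk, List.cons_append]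
      have hc2 : t[k] = c := (List.cons_eq_cons.mp heq2.symm).1
      have hmem' : t[k] ∈ List.takeWhile (fun x => decide (x ≠ c)) s := by
        rw [← htdef]; exact List.getElem_mem hlt
      have hp := List.mem_takeWhile_imp hmem'
      simp [hc2] at hp
    · exact heq
    · exfalso
      apply hmin t.length hgt
      refine ⟨(s.dropWhile (· ≠ c)).tail, ?_⟩
      rw [hd]
      conv_rhs => rw [← List.cons_head_tail hdn]
      rw [hhead]
      rfl
  have hfin : ((k : Nat) : Int) = PySem.Chars.find s [c] := Int.toNat_of_nonneg h0
  rw [← hfin, hkt]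

theorem pvMatchTS_none_of_not_cond (line : List Char)
    (hs : ¬(PySem.Chars.startswith line ['['] = true ∧ PySem.Chars.isIn [']'] line = true)) :
    pvMatchTS line = none := by
  by_cases h1 : line.head? = some '['
  · -- then startswith holds, so ']' ∉ line
    have hne : line ≠ [] := by intro hc; rw [hc] at h1; simp at h1
    have hsw : PySem.Chars.startswith line ['['] = true := by
      rw [PySem.Chars.startswith_iff]
      refine ⟨line.tail, ?_⟩
      have := List.cons_head_tail hne
      have hh : line.head hne = '[' := by
        have := List.head?_eq_some_head (l := line) hne
        rw [this] at h1
        exact Option.some.inj h1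
      rw [← this, hh]; rfl
    have hni : ¬ PySem.Chars.isIn [']'] line = true := fun hi => hs ⟨hsw, hi⟩
    have hnm : ']' ∉ line := by
      intro hm
      exact hni ((PySem.Chars.isIn_iff_infix _ _).mpr ((List.singleton_infix_iff _ _).mpr hm))
    simp only [pvMatchTS, if_pos h1]
    have h2 : ¬ (line.tail.drop (line.tail.takeWhile (· ≠ ']')).length).head? = some ']' := by
      intro h2
      apply hnm
      apply List.mem_of_mem_tail
      apply List.mem_of_mem_drop (i := (line.tail.takeWhile (· ≠ ']')).length)
      exact List.mem_of_mem_head? (by rw [h2]; rfl)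
    rw [if_neg h2]
  · simp [pvMatchTS, h1]

theorem pvStripA_eq_pvSubTS (line : List Char) : pvStripA line = pvSubTS line := by
  by_cases hs : PySem.Chars.startswith line ['['] = true ∧ PySem.Chars.isIn [']'] line = true
  · obtain ⟨r, rfl⟩ : ∃ r, line = '[' :: r := by
      obtain ⟨u, hu⟩ := (PySem.Chars.startswith_iff _ _).mp hs.1
      exact ⟨u, by simpa using hu.symm⟩
    have hmem : ']' ∈ '[' :: r := (List.singleton_infix_iff _ _).mp
      ((PySem.Chars.isIn_iff_infix _ _).mp hs.2)
    have hmr : ']' ∈ r := by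
      rcases List.mem_cons.mp hmem with h | h
      · exact absurd h (by decide)
      · exact h
    have hfind : PySem.Chars.find ('[' :: r) [']']
        = (((r.takeWhile (· ≠ ']')).length + 1 : Nat) : Int) := by
      rw [pvFindSingleton _ _ hmem, List.takeWhile_cons_of_pos (by decide)]
      simp
    have hdr : r.drop (r.takeWhile (· ≠ ']')).length = r.dropWhile (· ≠ ']') :=
      pvDropLenTakeWhile _ r
    have hdn : r.dropWhile (· ≠ ']') ≠ [] := pvDropWhileNe_ne_nil r ']' hmr
    have hhd : (r.dropWhile (· ≠ ']')).head hdn = ']' := pvHead_dropWhileNe r ']' hmr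
    have hafter : r.drop (r.takeWhile (· ≠ ']')).length = ']' :: (r.dropWhile (· ≠ ']')).tail := by
      rw [hdr]
      conv_lhs => rw [← List.cons_head_tail hdn, hhd]
    have hheadA : PySem.List.slice ('[' :: r) (some 1) (some (PySem.Chars.find ('[' :: r) [']']))
        = r.takeWhile (· ≠ ']') := by
      rw [hfind, show (1 : Int) = ((1 : Nat) : Int) by norm_num, PySem.List.slice_natCast]
      simp only [List.drop_succ_cons, List.drop_zero, Nat.add_sub_cancel]
      exact (List.prefix_iff_eq_take.mp (List.takeWhile_prefix _)).symm
    have hrec : PySem.Chars.lstrip (PySem.List.slice ('[' :: r)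
          (some (PySem.Chars.find ('[' :: r) [']'] + 1)) none)
        = ((r.dropWhile (· ≠ ']')).tail).dropWhile PySem.Chars.isspace := by
      rw [hfind, PySem.List.slice_from _ (by omega)]
      have ht : (((((r.takeWhile (· ≠ ']')).length + 1 : Nat) : Int) + 1)).toNat
          = (r.takeWhile (· ≠ ']')).length + 2 := by omega
      rw [ht]
      show PySem.Chars.lstrip (List.drop ((r.takeWhile (· ≠ ']')).length + 1) r) = _
      rw [← List.tail_drop, hafter]
      rfl
    by_cases hcolon : ':' ∈ r.takeWhile (· ≠ ']')
    · -- both strip one group and continue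
      have hm : pvMatchTS ('[' :: r)
          = some (((r.dropWhile (· ≠ ']')).tail).dropWhile PySem.Chars.isspace) := by
        simp only [pvMatchTS, List.head?_cons, List.tail_cons, if_pos, hafter]
        rw [if_pos hcolon]
      have hi : PySem.Chars.isIn [':'] (PySem.List.slice ('[' :: r) (some 1)
          (some (PySem.Chars.find ('[' :: r) [']']))) = true := by
        rw [hheadA]
        exact (PySem.Chars.isIn_iff_infix _ _).mpr ((List.singleton_infix_iff _ _).mpr hcolon)
      rw [pvStripA]
      rw [dif_pos hs, if_pos hi, hrec]
      conv_rhs => rw [pvSubTS]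
      split
      · next rest heq =>
        rw [hm] at heq
        injection heq with heq
        rw [← heq]
        exact pvStripA_eq_pvSubTS _
      · next heq => rw [hm] at heq; cases heq
    · -- colon missing: both stop
      have hm : pvMatchTS ('[' :: r) = none := by
        simp only [pvMatchTS, List.head?_cons, List.tail_cons, if_pos, hafter]
        rw [if_neg hcolon]
      have hi : ¬ PySem.Chars.isIn [':'] (PySem.List.slice ('[' :: r) (some 1)
          (some (PySem.Chars.find ('[' :: r) [']']))) = true := by
        rw [hheadA]
        intro h
        exact hcolon ((List.singleton_infix_iff _ _).mp ((PySem.Chars.isIn_iff_infix _ _).mp h))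
      rw [pvStripA, dif_pos hs, if_neg hi]
      conv_rhs => rw [pvSubTS]
      split
      · next rest heq => rw [hm] at heq; cases heq
      · rfl
  · have hm := pvMatchTS_none_of_not_cond line hs
    rw [pvStripA, dif_neg hs]
    conv_rhs => rw [pvSubTS]
    split
    · next rest heq => rw [hm] at heq; cases heq
    · rfl
termination_by line.length
decreasing_by
  have l1 := List.length_dropWhile_le PySem.Chars.isspace ((r.dropWhile (· ≠ ']')).tail)
  have l2 : ((r.dropWhile (· ≠ ']')).tail).length = (r.dropWhile (· ≠ ']')).length - 1 :=
    List.length_tail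
  have l3 : (r.dropWhile (· ≠ ']')).length ≤ r.length := (List.dropWhile_suffix _).length_le
  have l4 : ('[' :: r).length = r.length + 1 := List.length_cons
  have l5 : line.length = ('[' :: r).length := by
    have h : line = '[' :: r := by assumption
    rw [h]
  omega

theorem pvFoldl_eq_filterMap (f : List Char → List Char) (l : List (List Char))
    (acc : List (List Char)) :
    l.foldl (fun acc raw => if f raw ≠ [] then acc ++ [f raw] else acc) acc
      = acc ++ l.filterMap (fun raw => if f raw = [] then none else some (f raw)) := by
  induction l generalizing acc with
  | nil => simp
  | cons x xs ih =>
    simp only [List.foldl_cons, List.filterMap_cons]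
    by_cases hx : f x = []
    · rw [if_neg (by simpa using hx), hx]
      simpa using ih acc
    · rw [if_pos (by simpa using hx), if_neg hx, ih (acc ++ [f x])]
      simp

-- ===== VERDICT (by name: the statement is the Claim_ definition above) =====
theorem cleanup_lyrics_text_py_spec : Claim_equal_cleanup_lyrics_text_py := by
  intro text _
  unfold Spec_cleanup_lyrics_text_py cleanup_lyrics_text_py cleanup_lyrics_text_py_alt
  match text with
  | none => rfl
  | some s =>
    simp only
    split
    · rfl
    · rw [pvFoldl_eq_filterMap (fun raw => pvStripA (PySem.Chars.strip raw))]
      simp only [List.nil_append, pvStripA_eq_pvSubTS]
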